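-- pv_equiv track=rewrite | github.com/Dolkir643/afdparts_Bot | tg_bot.py | _flat_shown_items
-- ===== SOURCE A (Python) =====
-- def _take_up_to_3_unique_prices(items: list) -> list:
--     """До 3 позиций в секции, цены не повторяются, от меньшей к большей."""
--     sorted_items = sorted(items, key=lambda x: (x.get("price") is None, x.get("price") or 0))
--     seen_prices = set()
--     out = []
--     for it in sorted_items:
--         if len(out) >= 3:
--             break
--         p = it.get("price")
--         if p is not None and p in seen_prices:
--             continue
--         if p is not None:
--             seen_prices.add(p)
--         out.append(it)
--     return out
--
-- def _flat_shown_items(requested: list, originals: list, analogs: list) -> list[tuple[int, dict]]: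
--     """Список (номер_позиции, item) в том же порядке, что и в выводе результата."""
--     out = []
--     num = 1
--     for item in _take_up_to_3_unique_prices(requested):
--         out.append((num, item))
--         num += 1
--     for item in _take_up_to_3_unique_prices(originals):
--         out.append((num, item))
--         num += 1
--     for item in _take_up_to_3_unique_prices(analogs):
--         out.append((num, item))
--         num += 1
--     return out
-- ===== SOURCE B (Python) =====
-- def _pick3(items):
--     # One linear pass: first item for each distinct price, plus None-priced items in order.
--     firsts = {}
--     nones = []
--     for it in items:
--         p = it.get("price")
--         if p is None:
--             nones.append(it)
--         elif p not in firsts: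
--             firsts[p] = it
--     out = []
--     lo = None
--     for _ in range(3):
--         best = None
--         for p, it in firsts.items():
--             if (lo is None or p > lo) and (best is None or p < best[0]):
--                 best = (p, it)
--         if best is None:
--             break
--         out.append(best[1])
--         lo = best[0]
--     return out + nones[:3 - len(out)]
--
-- def _flat_shown_items(requested: list, originals: list, analogs: list) -> list:
--     items = _pick3(requested) + _pick3(originals) + _pick3(analogs)
--     return list(enumerate(items, 1))
-- ===== Notes on version B (the rewrite author's own statement) =====
-- stated objective: alternative
-- what changed: Per section, B replaces sort-then-dedup-then-take-3 by a single linear pass that records the first item per distinct price and the None-priced items, followed by three minimum-selection scans over the distinct prices; in CPython the interpreted scan is about as fast as the C-implemented sort, so no speed is claimed.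
import Mathlib
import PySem

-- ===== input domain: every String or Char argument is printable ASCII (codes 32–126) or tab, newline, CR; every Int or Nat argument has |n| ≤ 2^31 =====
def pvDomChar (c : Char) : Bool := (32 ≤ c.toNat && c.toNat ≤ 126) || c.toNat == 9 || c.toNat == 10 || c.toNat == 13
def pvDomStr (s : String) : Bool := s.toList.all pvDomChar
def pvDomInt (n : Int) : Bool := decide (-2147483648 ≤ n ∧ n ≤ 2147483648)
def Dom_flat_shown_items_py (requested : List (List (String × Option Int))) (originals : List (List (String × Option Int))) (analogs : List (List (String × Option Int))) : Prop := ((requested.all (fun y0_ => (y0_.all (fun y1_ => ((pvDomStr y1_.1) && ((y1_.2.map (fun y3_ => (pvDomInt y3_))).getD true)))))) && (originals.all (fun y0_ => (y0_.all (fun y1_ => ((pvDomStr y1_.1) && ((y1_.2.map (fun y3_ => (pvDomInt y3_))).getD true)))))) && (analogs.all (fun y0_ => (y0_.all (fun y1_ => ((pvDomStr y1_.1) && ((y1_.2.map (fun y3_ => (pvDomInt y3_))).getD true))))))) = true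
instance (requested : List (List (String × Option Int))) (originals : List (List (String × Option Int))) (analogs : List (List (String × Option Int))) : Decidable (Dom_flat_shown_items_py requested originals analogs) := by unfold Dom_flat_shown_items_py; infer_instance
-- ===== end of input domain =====

-- B replaces per-section sort-then-dedup by a different algorithm: one pass collecting the
-- first item per distinct price and the None-priced items, then three minimum-selection scans.

-- ===== PORT A =====
-- items are Python dicts (assoc lists); it.get("price") = first-match lookup, default None
def pvPrice (it : List (String × Option Int)) : Option Int :=
  PySem.Dict.getD ⟨it⟩ "price" none

-- the 'for it in sorted_items' loop of _take_up_to_3_unique_prices (break at 3, skip seen prices)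
def pvATake : List (List (String × Option Int)) → PySem.Set Int → List (List (String × Option Int)) → List (List (String × Option Int))
  | [], _, out => out
  | it :: rest, seen, out =>
    if 3 ≤ out.length then out
    else
      match pvPrice it with
      | some p =>
          if PySem.Set.contains seen p then pvATake rest seen out
          else pvATake rest (PySem.Set.add seen p) (out ++ [it])
      | none => pvATake rest seen (out ++ [it])

-- _take_up_to_3_unique_prices; key2 'x.get("price") or 0' is (price x).getD 0 — exact,
-- since both falsy cases (None and 0) yield 0
def pvATake3 (items : List (List (String × Option Int))) : List (List (String × Option Int)) :=
  pvATake (PySem.List.sorted2 items (fun x => (pvPrice x).isNone) (fun x => (pvPrice x).getD 0)) PySem.Set.empty []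

-- one 'for item in …: out.append((num, item)); num += 1' block of _flat_shown_items
def pvANum (st : List (Int × (List (String × Option Int))) × Int) (its : List (List (String × Option Int))) : List (Int × (List (String × Option Int))) × Int :=
  its.foldl (fun s it => (s.1 ++ [(s.2, it)], s.2 + 1)) st

def flat_shown_items_py (requested : List (List (String × Option Int))) (originals : List (List (String × Option Int))) (analogs : List (List (String × Option Int))) : List (Int × (List (String × Option Int))) :=
  (pvANum (pvANum (pvANum ([], 1) (pvATake3 requested)) (pvATake3 originals)) (pvATake3 analogs)).1

-- ===== PORT B =====
-- single pass of _pick3: firsts = first item per distinct price, nones = None-priced in order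
def pvBScan (items : List (List (String × Option Int))) : PySem.Dict Int (List (String × Option Int)) × List (List (String × Option Int)) :=
  items.foldl (fun st it =>
    match pvPrice it with
    | none => (st.1, st.2 ++ [it])
    | some p => if PySem.Dict.contains st.1 p then st else (PySem.Dict.insert st.1 p it, st.2))
    (PySem.Dict.empty, [])

-- the inner 'for p, it in firsts.items()' minimum scan of _pick3
def pvBBest (lo : Option Int) (f : PySem.Dict Int (List (String × Option Int))) : Option (Int × (List (String × Option Int))) :=
  f.items.foldl (fun best e =>
    if (match lo with | none => true | some l => decide (l < e.1))
        && (match best with | none => true | some b => decide (e.1 < b.1))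
    then some e else best) none

-- the 'for _ in range(3)' selection loop of _pick3 (break when no candidate)
def pvBRounds : Nat → Option Int → PySem.Dict Int (List (String × Option Int)) → List (List (String × Option Int))
  | 0, _, _ => []
  | Nat.succ k, lo, f =>
    match pvBBest lo f with
    | none => []
    | some e => e.2 :: pvBRounds k (some e.1) f

-- _pick3; 'nones[:3 - len(out)]' with 0 ≤ 3 - len(out) ≤ 3 is List.take — exact
def pvBPick3 (items : List (List (String × Option Int))) : List (List (String × Option Int)) :=
  let s := pvBScan items
  let out := pvBRounds 3 none s.1
  out ++ s.2.take (3 - out.length)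

def flat_shown_items_py_alt (requested : List (List (String × Option Int))) (originals : List (List (String × Option Int))) (analogs : List (List (String × Option Int))) : List (Int × (List (String × Option Int))) :=
  PySem.List.enumerate (pvBPick3 requested ++ pvBPick3 originals ++ pvBPick3 analogs) 1

-- ===== PRECONDITION & SPEC =====
def Spec_flat_shown_items_py (requested : List (List (String × Option Int))) (originals : List (List (String × Option Int))) (analogs : List (List (String × Option Int))) (out : List (Int × (List (String × Option Int)))) : Prop := out = flat_shown_items_py_alt requested originals analogs
instance (requested : List (List (String × Option Int))) (originals : List (List (String × Option Int))) (analogs : List (List (String × Option Int))) (out : List (Int × (List (String × Option Int)))) : Decidable (Spec_flat_shown_items_py requested originals analogs out) := by unfold Spec_flat_shown_items_py; infer_instance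

-- ===== CLAIM (what is proved, stated in full; the proofs are below) =====
def Claim_equal_flat_shown_items_py : Prop := ∀ (requested : List (List (String × Option Int))) (originals : List (List (String × Option Int))) (analogs : List (List (String × Option Int))), Dom_flat_shown_items_py requested originals analogs → Spec_flat_shown_items_py requested originals analogs (flat_shown_items_py requested originals analogs)

-- ===== LEMMAS AND PROOFS =====

-- Abbreviation used only by the proofs
def pvKey (it : List (String × Option Int)) : Bool ×ₗ Int := toLex ((pvPrice it).isNone, (pvPrice it).getD 0)
def pvPr (it : List (String × Option Int)) : Int := (pvPrice it).getD 0

-- A's tuple sort key is the lexicographic key pvKey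
theorem pv_sort_bridge (items : List (List (String × Option Int))) :
    PySem.List.sorted2 items (fun x => (pvPrice x).isNone) (fun x => (pvPrice x).getD 0) false
      = PySem.List.sorted items pvKey false := by
  simp only [PySem.List.sorted2, PySem.List.sorted, Bool.false_eq_true, if_false]
  have h : (fun a b : List (String × Option Int) => (decide ((pvPrice a).isNone < (pvPrice b).isNone) || !decide ((pvPrice b).isNone < (pvPrice a).isNone) && decide ((pvPrice a).getD 0 < (pvPrice b).getD 0))) = (fun a b : List (String × Option Int) => decide (pvKey a < pvKey b)) := by
    funext a b
    rcases ha : (pvPrice a).isNone <;> rcases hb : (pvPrice b).isNone <;>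
      simp [pvKey, Prod.Lex.lt_iff, ha, hb]
  rw [h]

-- stability of insertion into a sorted list, per key value
theorem pv_filter_insertBy {α κ : Type} [LinearOrder κ] (key : α → κ) (x : α) (acc : List α)
    (hs : acc.Pairwise (fun a b => key a ≤ key b)) (v : κ) :
    (PySem.List.insertBy (fun a b => decide (key a < key b)) x acc).filter (fun y => decide (key y = v))
      = if key x = v then acc.filter (fun y => decide (key y = v)) ++ [x] else acc.filter (fun y => decide (key y = v)) := by
  induction acc with
  | nil => simp [PySem.List.insertBy]; split <;> simp_all
  | cons y ys ih =>
    rw [List.pairwise_cons] at hs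
    simp only [PySem.List.insertBy]
    split
    · rename_i hlt
      simp only [decide_eq_true_eq] at hlt
      have hnil : key x = v → (y :: ys).filter (fun z => decide (key z = v)) = [] := by
        intro hw
        rw [List.filter_eq_nil_iff]
        intro z hz
        have hyz : key y ≤ key z := by
          rcases hz with _ | hz
          · exact le_refl _
          · exact hs.1 z (by assumption)
        simp only [decide_eq_true_eq]
        intro h
        rw [← hw] at h
        rw [← h] at hlt
        exact absurd (lt_of_lt_of_le hlt hyz) (lt_irrefl _)
      by_cases hv : key x = v
      · rw [if_pos hv, hnil hv]
        simp [hv, hnil hv]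
      · rw [if_neg hv]
        simp only [List.filter_cons]
        split
        · rename_i h; simp only [decide_eq_true_eq] at h; exact absurd h hv
        · rfl
    · have ihh := ih hs.2
      by_cases hyv : key y = v <;> by_cases hxv : key x = v <;>
        simp_all

-- stability of the sort, per key value
theorem pv_sorted_filter {α κ : Type} [LinearOrder κ] (key : α → κ) (xs : List α) (v : κ) :
    (PySem.List.sorted xs key false).filter (fun y => decide (key y = v))
      = xs.filter (fun y => decide (key y = v)) := by
  induction xs using List.reverseRecOn with
  | nil => rfl
  | append_singleton ys x ih =>
    have hstep : PySem.List.sorted (ys ++ [x]) key false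
        = PySem.List.insertBy (fun a b => decide (key a < key b)) x (PySem.List.sorted ys key false) := by
      rw [PySem.List.sorted_eq_foldl_insertBy, PySem.List.sorted_eq_foldl_insertBy, List.foldl_append]
      rfl
    rw [hstep, pv_filter_insertBy key x _ (PySem.List.sorted_pairwise ys key) v, List.filter_append]
    by_cases hxv : key x = v <;> simp [hxv, ih]

-- a list that is Pairwise-sorted for a monotone Bool predicate splits as (¬q-part) ++ (q-part)
theorem pv_filter_decomp {α : Type} (q : α → Bool) (R : α → α → Prop) :
    ∀ (S : List α), S.Pairwise R → (∀ a ∈ S, ∀ b ∈ S, R a b → q a = true → q b = true) →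
      S = S.filter (fun x => !q x) ++ S.filter q := by
  intro S
  induction S with
  | nil => simp
  | cons a t ih =>
    intro hp hm
    rw [List.pairwise_cons] at hp
    by_cases ha : q a = true
    · have hall : ∀ b ∈ t, q b = true := fun b hb =>
        hm a (by simp) b (by simp [hb]) (hp.1 b hb) ha
      have h1 : (a :: t).filter (fun x => !q x) = [] := by
        rw [List.filter_eq_nil_iff]
        rintro z (_ | hz)
        · simp [ha]
        · simp [hall z (by assumption)]
      have h2 : (a :: t).filter q = a :: t := by
        rw [List.filter_eq_self]
        rintro z (_ | hz)
        · exact ha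
        · exact hall z (by assumption)
      rw [h1, h2]; rfl
    · have iht := ih hp.2 (fun x hx y hy hr hq => hm x (by simp [hx]) y (by simp [hy]) hr hq)
      simp only [List.filter_cons, ha]
      simp only [Bool.not_false, if_true]
      rw [List.cons_append]
      exact congrArg _ iht

-- once out is full, the A-loop returns it
theorem pvATake_full (l : List (List (String × Option Int))) (seen : PySem.Set Int) (out : List (List (String × Option Int)))
    (h : 3 ≤ out.length) : pvATake l seen out = out := by
  cases l <;> simp [pvATake, h]

-- items whose price is already seen are skipped
theorem pvATake_skip (dups rest : List (List (String × Option Int))) (seen : PySem.Set Int) (out : List (List (String × Option Int)))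
    (h : ∀ d ∈ dups, ∃ p, pvPrice d = some p ∧ PySem.Set.contains seen p = true) :
    pvATake (dups ++ rest) seen out = pvATake rest seen out := by
  induction dups with
  | nil => rfl
  | cons d t ih =>
    obtain ⟨p, hp, hc⟩ := h d (by simp)
    by_cases hl : 3 ≤ out.length
    · rw [List.cons_append, pvATake, if_pos hl, pvATake_full _ _ _ hl]
    · rw [List.cons_append, pvATake, if_neg hl, hp]
      simp only [hc, if_true]
      exact ih (fun x hx => h x (by simp [hx]))

-- the A-loop on None-priced items appends until out is full
theorem pvATake_nones (Ns : List (List (String × Option Int))) (seen : PySem.Set Int) :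
    ∀ out, (∀ it ∈ Ns, pvPrice it = none) →
      pvATake Ns seen out = out ++ Ns.take (3 - out.length) := by
  induction Ns with
  | nil => simp [pvATake]
  | cons n t ih =>
    intro out h
    by_cases hl : 3 ≤ out.length
    · rw [pvATake, if_pos hl]
      have : 3 - out.length = 0 := by omega
      simp [this]
    · rw [pvATake, if_neg hl, h n (by simp)]
      simp only []
      rw [ih (out ++ [n]) (fun x hx => h x (by simp [hx]))]
      have h1 : 3 - out.length = (3 - (out ++ [n]).length) + 1 := by simp; omega
      rw [h1, List.take_succ_cons]
      simp

-- canonical selection: first element, then recurse on the other prices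
def pvCanon : List (List (String × Option Int)) → Nat → List (List (String × Option Int))
  | _, 0 => []
  | [], _ => []
  | it :: rest, Nat.succ k =>
      it :: pvCanon (rest.filter (fun y => !decide (pvPrice y = pvPrice it))) k
  termination_by P _ => P.length
  decreasing_by
    simp only [List.length_cons, List.length_unattach]
    exact Nat.lt_succ_of_le (le_trans (List.length_filter_le _ _) (by simp))

-- the A-loop on sorted priced items ++ None items is the canonical selection plus padding
theorem pvATake_canon : ∀ (P : List (List (String × Option Int))), ∀ (Ns : List (List (String × Option Int))) (seen : PySem.Set Int) (out : List (List (String × Option Int))),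
    P.Pairwise (fun a b => pvPr a ≤ pvPr b) →
    (∀ it ∈ P, (pvPrice it).isSome) →
    (∀ it ∈ P, PySem.Set.contains seen (pvPr it) = false) →
    (∀ it ∈ Ns, pvPrice it = none) →
    pvATake (P ++ Ns) seen out
      = out ++ pvCanon P (3 - out.length) ++ Ns.take ((3 - out.length) - (pvCanon P (3 - out.length)).length) := by
  suffices H : ∀ n (P : List (List (String × Option Int))), P.length ≤ n → ∀ (Ns : List (List (String × Option Int))) (seen : PySem.Set Int) (out : List (List (String × Option Int))),
      P.Pairwise (fun a b => pvPr a ≤ pvPr b) →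
      (∀ it ∈ P, (pvPrice it).isSome) →
      (∀ it ∈ P, PySem.Set.contains seen (pvPr it) = false) →
      (∀ it ∈ Ns, pvPrice it = none) →
      pvATake (P ++ Ns) seen out
        = out ++ pvCanon P (3 - out.length) ++ Ns.take ((3 - out.length) - (pvCanon P (3 - out.length)).length) by
    intro P Ns seen out h1 h2 h3 h4
    exact H P.length P le_rfl Ns seen out h1 h2 h3 h4
  intro n
  induction n with
  | zero =>
    intro P hPl Ns seen out _ _ _ hN
    have : P = [] := List.eq_nil_of_length_eq_zero (by omega)
    subst this
    rw [List.nil_append, pvATake_nones Ns seen out hN]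
    have hc : ∀ k, pvCanon ([] : List (List (String × Option Int))) k = [] := by
      intro k; cases k <;> simp [pvCanon]
    simp [hc]
  | succ n ih =>
    intro P hPlen Ns seen out hP hS hseen hN
    match P, hPlen, hP, hS, hseen with
    | [], _, _, _, _ =>
      rw [List.nil_append, pvATake_nones Ns seen out hN]
      have hc : ∀ k, pvCanon ([] : List (List (String × Option Int))) k = [] := by
        intro k; cases k <;> simp [pvCanon]
      simp [hc]
    | it :: rest, hPlen, hP, hS, hseen =>
      by_cases hl : 3 ≤ out.length
      · rw [List.cons_append, pvATake, if_pos hl]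
        have h0 : 3 - out.length = 0 := by omega
        simp [h0, pvCanon]
      · obtain ⟨p, hp⟩ := Option.isSome_iff_exists.mp (hS it (by simp))
        have hpr : pvPr it = p := by simp [pvPr, hp]
        have hrestP : rest.Pairwise (fun a b => pvPr a ≤ pvPr b) := (List.pairwise_cons.mp hP).2
        have hheadle : ∀ y ∈ rest, p ≤ pvPr y := by
          intro y hy
          have := (List.pairwise_cons.mp hP).1 y hy
          omega
        have hmono : ∀ a ∈ rest, ∀ b ∈ rest, pvPr a ≤ pvPr b →
            (!decide (pvPrice a = pvPrice it)) = true → (!decide (pvPrice b = pvPrice it)) = true := by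
          intro a ha b hb hab hqa
          obtain ⟨pa, hpa⟩ := Option.isSome_iff_exists.mp (hS a (by simp [ha]))
          obtain ⟨pb, hpb⟩ := Option.isSome_iff_exists.mp (hS b (by simp [hb]))
          simp only [hp, hpa, hpb, Bool.not_eq_true', decide_eq_false_iff_not] at hqa ⊢
          have hpra : pvPr a = pa := by simp [pvPr, hpa]
          have hprb : pvPr b = pb := by simp [pvPr, hpb]
          have h1 : p ≤ pa := by have := hheadle a ha; omega
          have h2 : pa ≠ p := by intro h; exact hqa (by rw [h])
          intro h
          have : pb = p := by injection h
          omega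
        have hdec := pv_filter_decomp (fun y => !decide (pvPrice y = pvPrice it))
          (fun a b => pvPr a ≤ pvPr b) rest hrestP hmono
        rw [List.cons_append, pvATake, if_neg hl, hp]
        have hcs : PySem.Set.contains seen p = false := by
          have := hseen it (by simp); rwa [hpr] at this
        simp only [hcs, Bool.false_eq_true, if_false]
        rw [show rest = rest.filter (fun x => !(!decide (pvPrice x = pvPrice it))) ++ rest.filter (fun y => !decide (pvPrice y = pvPrice it)) from hdec, List.append_assoc]
        rw [pvATake_skip _ _ _ _ ?hdup]
        case hdup =>
          intro d hd
          have hqd := List.of_mem_filter hd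
          simp only [Bool.not_not, decide_eq_true_eq] at hqd
          refine ⟨p, by rw [hqd, hp], ?_⟩
          rw [PySem.Set.contains_iff]
          rw [PySem.Set.mem_add]
          right; rfl
        have hseen' : ∀ y ∈ rest.filter (fun y => !decide (pvPrice y = pvPrice it)),
            PySem.Set.contains (PySem.Set.add seen p) (pvPr y) = false := by
          intro y hy
          have hmem := List.mem_of_mem_filter hy
          have hqy := List.of_mem_filter hy
          simp only [Bool.not_eq_true', decide_eq_false_iff_not] at hqy
          obtain ⟨py, hpy⟩ := Option.isSome_iff_exists.mp (hS y (by simp [hmem]))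
          have hpry : pvPr y = py := by simp [pvPr, hpy]
          have h1 : PySem.Set.contains seen (pvPr y) = false := hseen y (by simp [hmem])
          have h2 : py ≠ p := by
            intro h; exact hqy (by rw [hpy, hp, h])
          rw [Bool.eq_false_iff]
          intro hc
          rw [PySem.Set.contains_iff, PySem.Set.mem_add] at hc
          rcases hc with hc | hc
          · rw [Bool.eq_false_iff] at h1
            exact h1 (by rw [PySem.Set.contains_iff]; exact hc)
          · rw [hpry] at hc; exact h2 hc
        rw [ih (rest.filter (fun y => !decide (pvPrice y = pvPrice it)))
              (le_trans (List.length_filter_le _ _) (by simpa using Nat.lt_succ_iff.mp (by simpa using hPlen)))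
              Ns (PySem.Set.add seen p) (out ++ [it])
              (hrestP.sublist List.filter_sublist)
              (fun y hy => hS y (by simp [List.mem_of_mem_filter hy]))
              hseen' hN]
        have hk : 3 - out.length = (3 - (out ++ [it]).length) + 1 := by
          simp only [List.length_append, List.length_cons, List.length_nil]
          omega
        rw [hk]
        have hdec2 := hdec
        rw [hp] at hdec2
        simp only [pvCanon, hp]
        rw [← hdec2]
        have harith : ∀ (m : Nat) (c : List (List (String × Option Int))), (m + 1) - (it :: c).length = m - c.length := by
          intro m c; simp only [List.length_cons]; omega
        rw [harith]
        simp [List.append_assoc]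

-- B's scan: one snoc step
theorem pvBScan_append (items : List (List (String × Option Int))) (x : List (String × Option Int)) :
    pvBScan (items ++ [x]) =
      (match pvPrice x with
       | none => ((pvBScan items).1, (pvBScan items).2 ++ [x])
       | some p => if PySem.Dict.contains (pvBScan items).1 p then pvBScan items
                   else (PySem.Dict.insert (pvBScan items).1 p x, (pvBScan items).2)) := by
  unfold pvBScan
  rw [List.foldl_append]
  rfl

-- B's scan: the None-priced side
theorem pvBScan_nones (items : List (List (String × Option Int))) :
    (pvBScan items).2 = items.filter (fun it => (pvPrice it).isNone) := by
  induction items using List.reverseRecOn with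
  | nil => rfl
  | append_singleton ys x ih =>
    rw [pvBScan_append, List.filter_append]
    cases hx : pvPrice x with
    | none => simp [ih, hx]
    | some p =>
      simp only []
      split <;> simp [ih, hx]

-- B's scan: lookup in firsts is first-item-with-that-price
theorem pvBScan_get (items : List (List (String × Option Int))) : ∀ (p : Int),
    PySem.Dict.get? (pvBScan items).1 p = (items.filter (fun y => decide (pvPrice y = some p))).head? := by
  induction items using List.reverseRecOn with
  | nil => intro p; rfl
  | append_singleton ys x ih =>
    intro p
    rw [pvBScan_append, List.filter_append]
    cases hx : pvPrice x with
    | none =>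
      have : decide (pvPrice x = some p) = false := by simp [hx]
      simp [this, ih]
    | some q =>
      by_cases hpq : p = q
      · subst hpq
        have hd : decide (pvPrice x = some p) = true := by simp [hx]
        by_cases hc : PySem.Dict.contains (pvBScan ys).1 p = true
        · have hne : (ys.filter (fun y => decide (pvPrice y = some p))) ≠ [] := by
            intro hnil
            have h1 := ih p
            rw [hnil] at h1
            have h2 := (PySem.Dict.get?_eq_none_iff_contains (pvBScan ys).1 p).mp (by rw [h1]; rfl)
            rw [hc] at h2
            exact Bool.true_eq_false.mp h2
          simp only [hc, if_true]
          rw [ih, List.head?_append]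
          cases hys : ys.filter (fun y => decide (pvPrice y = some p)) with
          | nil => exact absurd hys hne
          | cons a t => simp
        · have hnil : (ys.filter (fun y => decide (pvPrice y = some p))) = [] := by
            cases hys : ys.filter (fun y => decide (pvPrice y = some p)) with
            | nil => rfl
            | cons a t =>
              exfalso
              have hcf : PySem.Dict.contains (pvBScan ys).1 p = false := Bool.eq_false_iff.mpr hc
              have := (PySem.Dict.get?_eq_none_iff_contains (pvBScan ys).1 p).mpr hcf
              rw [ih p, hys] at this
              simp at this
          simp only [hc]
          simp only [Bool.false_eq_true, if_false]
          rw [PySem.Dict.get?_insert_self, hnil]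
          simp [hd]
      · have hd : decide (pvPrice x = some p) = false := by simp [hx, Ne.symm, hpq]
        by_cases hc : PySem.Dict.contains (pvBScan ys).1 q = true
        · simp [hc, ih, hd]
        · simp only [hc, Bool.false_eq_true, if_false]
          rw [PySem.Dict.get?_insert_of_ne _ _ hpq, ih]
          simp [hd]

theorem pvBScan_nodup (items : List (List (String × Option Int))) :
    (pvBScan items).1.keys.Nodup := by
  induction items using List.reverseRecOn with
  | nil => simp [pvBScan, PySem.Dict.empty]
  | append_singleton ys x ih =>
    rw [pvBScan_append]
    cases hx : pvPrice x with
    | none => exact ih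
    | some p =>
      by_cases hc : PySem.Dict.contains (pvBScan ys).1 p = true
      · simpa [hc] using ih
      · simp only [hc, Bool.false_eq_true, if_false]
        exact PySem.Dict.nodup_keys_insert _ _ _ ih

-- candidate test of the B scan
def pvOk (lo : Option Int) (p : Int) : Bool := match lo with | none => true | some l => decide (l < p)

theorem pvBBest_aux (lo : Option Int) : ∀ (E : List (Int × (List (String × Option Int)))),
    match E.foldl (fun best e => if pvOk lo e.1 && (match best with | none => true | some b => decide (e.1 < b.1)) then some e else best) none with
    | none => ∀ e ∈ E, pvOk lo e.1 = false
    | some r => r ∈ E ∧ pvOk lo r.1 = true ∧ ∀ e ∈ E, pvOk lo e.1 = true → r.1 ≤ e.1 := by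
  intro E
  induction E using List.reverseRecOn with
  | nil => intro e he; simp at he
  | append_singleton E e ih =>
    rw [List.foldl_append]
    cases hres : E.foldl (fun best e => if pvOk lo e.1 && (match best with | none => true | some b => decide (e.1 < b.1)) then some e else best) none with
    | none =>
      rw [hres] at ih
      simp only [List.foldl_cons, List.foldl_nil, Bool.and_true]
      by_cases hok : pvOk lo e.1 = true
      · simp only [hok, if_true]
        refine ⟨by simp, by simp, ?_⟩
        intro e' he' hok'
        rcases List.mem_append.mp he' with h | h
        · rw [ih e' h] at hok'; exact absurd hok' (by simp)
        · simp at h; subst h; exact le_refl _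
      · simp only [Bool.not_eq_true] at hok
        simp only [hok, Bool.false_eq_true, if_false]
        intro e' he'
        rcases List.mem_append.mp he' with h | h
        · exact ih e' h
        · simp at h; subst h; exact hok
    | some b =>
      rw [hres] at ih
      obtain ⟨hmem, hokb, hmin⟩ := ih
      simp only [List.foldl_cons, List.foldl_nil]
      by_cases hcond : (pvOk lo e.1 && decide (e.1 < b.1)) = true
      · simp only [hcond, if_true]
        have hok : pvOk lo e.1 = true := by
          rcases Bool.eq_false_or_eq_true (pvOk lo e.1) with h | h
          · exact h
          · rw [h] at hcond; simp at hcond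
        have hlt : e.1 < b.1 := by
          rcases Bool.eq_false_or_eq_true (decide (e.1 < b.1)) with h | h
          · exact of_decide_eq_true h
          · rw [h] at hcond; simp at hcond
        refine ⟨by simp, by simp [hok], ?_⟩
        intro e' he' hok'
        rcases List.mem_append.mp he' with h | h
        · exact le_trans (le_of_lt hlt) (hmin e' h hok')
        · simp at h; subst h; exact le_refl _
      · simp only [hcond, Bool.false_eq_true, if_false]
        refine ⟨by simp [hmem], hokb, ?_⟩
        intro e' he' hok'
        rcases List.mem_append.mp he' with h | h
        · exact hmin e' h hok'
        · simp only [List.mem_singleton] at h; subst h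
          have hnl : ¬ (e'.1 < b.1) := by
            intro hlt
            exact absurd hcond (by simp [hok', hlt])
          omega

theorem pvBBest_spec (lo : Option Int) (f : PySem.Dict Int (List (String × Option Int))) :
    match pvBBest lo f with
    | none => ∀ e ∈ f.items, pvOk lo e.1 = false
    | some r => r ∈ f.items ∧ pvOk lo r.1 = true ∧ ∀ e ∈ f.items, pvOk lo e.1 = true → r.1 ≤ e.1 :=
  pvBBest_aux lo f.items

-- B's selection rounds compute the canonical selection
theorem pv_mem_of_get? (f : PySem.Dict Int (List (String × Option Int))) (p : Int) (v : List (String × Option Int))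
    (h : f.get? p = some v) : (p, v) ∈ f.items := by
  unfold PySem.Dict.get? at h
  cases hf : f.items.find? (fun e => e.1 == p) with
  | none => rw [hf] at h; simp at h
  | some e =>
    rw [hf] at h
    simp only [Option.map_some, Option.some.injEq] at h
    have h1 := List.find?_some hf
    have h2 := List.mem_of_find?_eq_some hf
    simp only [beq_iff_eq] at h1
    have : e = (p, v) := by cases e; simp_all
    rwa [this] at h2

theorem pvBRounds_canon : ∀ (k : Nat) (lo : Option Int) (f : PySem.Dict Int (List (String × Option Int))) (P : List (List (String × Option Int))),
    P.Pairwise (fun a b => pvPr a ≤ pvPr b) →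
    (∀ it ∈ P, (pvPrice it).isSome) →
    f.keys.Nodup →
    (∀ p : Int, PySem.Dict.get? f p = (P.filter (fun y => decide (pvPrice y = some p))).head?) →
    pvBRounds k lo f = pvCanon (P.filter (fun y => pvOk lo (pvPr y))) k := by
  intro k
  induction k with
  | zero =>
    intro lo f P _ _ _ _
    cases P.filter (fun y => pvOk lo (pvPr y)) <;> simp [pvBRounds, pvCanon]
  | succ k ih =>
    intro lo f P hP hS hnd hget
    have hspec := pvBBest_spec lo f
    cases hb : pvBBest lo f with
    | none =>
      rw [hb] at hspec
      have hQ : P.filter (fun y => pvOk lo (pvPr y)) = [] := by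
        rw [List.filter_eq_nil_iff]
        intro y hy hok
        obtain ⟨p, hp⟩ := Option.isSome_iff_exists.mp (hS y hy)
        have hpr : pvPr y = p := by simp [pvPr, hp]
        have hyf : y ∈ P.filter (fun z => decide (pvPrice z = some p)) :=
          List.mem_filter.mpr ⟨hy, by simp [hp]⟩
        have hhead := hget p
        cases hfp : P.filter (fun z => decide (pvPrice z = some p)) with
        | nil => rw [hfp] at hyf; simp at hyf
        | cons a t =>
          rw [hfp] at hhead
          simp only [List.head?_cons] at hhead
          have hmem := pv_mem_of_get? f p a hhead
          have hfalse := hspec (p, a) hmem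
          rw [hpr] at hok
          simp only at hfalse
          rw [hok] at hfalse
          simp at hfalse
      rw [hQ]
      simp [pvBRounds, hb, pvCanon]
    | some r =>
      rw [hb] at hspec
      obtain ⟨hrmem, hrok, hrmin⟩ := hspec
      have hget_r : f.get? r.1 = some r.2 :=
        PySem.Dict.get?_of_mem_items f (by cases r; exact hrmem) hnd
      cases hQ : P.filter (fun y => pvOk lo (pvPr y)) with
      | nil =>
        exfalso
        rw [hget r.1] at hget_r
        cases hfp : P.filter (fun z => decide (pvPrice z = some r.1)) with
        | nil => rw [hfp] at hget_r; simp at hget_r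
        | cons a t =>
          have ha : a ∈ P.filter (fun z => decide (pvPrice z = some r.1)) := by rw [hfp]; simp
          have haP := List.mem_of_mem_filter ha
          have hap : pvPrice a = some r.1 := by
            have := List.of_mem_filter ha; simpa using this
          have hpra : pvPr a = r.1 := by simp [pvPr, hap]
          have haQ : a ∈ P.filter (fun y => pvOk lo (pvPr y)) :=
            List.mem_filter.mpr ⟨haP, by rw [hpra]; exact hrok⟩
          rw [hQ] at haQ
          simp at haQ
      | cons it rest2 =>
        have hitQ : it ∈ P.filter (fun y => pvOk lo (pvPr y)) := by rw [hQ]; simp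
        have hitP : it ∈ P := List.mem_of_mem_filter hitQ
        have hokit : pvOk lo (pvPr it) = true := List.of_mem_filter (p := fun y => pvOk lo (pvPr y)) hitQ
        obtain ⟨p, hp⟩ := Option.isSome_iff_exists.mp (hS it hitP)
        have hpr : pvPr it = p := by simp [pvPr, hp]
        have hOkp : pvOk lo p = true := by rw [← hpr]; exact hokit
        have hQpair : (it :: rest2).Pairwise (fun a b => pvPr a ≤ pvPr b) := by
          rw [← hQ]; exact hP.sublist List.filter_sublist
        have hitmin : ∀ y ∈ P, pvOk lo (pvPr y) = true → p ≤ pvPr y := by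
          intro y hy hoky
          have hyQ : y ∈ it :: rest2 := by rw [← hQ]; exact List.mem_filter.mpr ⟨hy, hoky⟩
          rcases List.mem_cons.mp hyQ with heq | hyr
          · rw [heq, hpr]
          · have h := (List.pairwise_cons.mp hQpair).1 y hyr
            rw [hpr] at h
            exact h
        have hfilter_eq : P.filter (fun z => decide (pvPrice z = some p))
            = (it :: rest2).filter (fun z => decide (pvPrice z = some p)) := by
          rw [← hQ, List.filter_filter]
          apply List.filter_congr
          intro z hz
          by_cases hzp : pvPrice z = some p
          · have hpz : pvPr z = p := by simp [pvPr, hzp]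
            simp [hzp, hpz, hOkp]
          · simp [hzp]
        have hheadp : f.get? p = some it := by
          rw [hget p, hfilter_eq]
          have hd : decide (pvPrice it = some p) = true := by simp [hp]
          simp [hd]
        have hr1p : r.1 = p := by
          have h1 : r.1 ≤ p := hrmin (p, it) (pv_mem_of_get? f p it hheadp) (by simpa using hOkp)
          rw [hget r.1] at hget_r
          cases hfp : P.filter (fun z => decide (pvPrice z = some r.1)) with
          | nil => rw [hfp] at hget_r; simp at hget_r
          | cons a t =>
            have ha : a ∈ P.filter (fun z => decide (pvPrice z = some r.1)) := by rw [hfp]; simp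
            have haP := List.mem_of_mem_filter ha
            have hap : pvPrice a = some r.1 := by
              have := List.of_mem_filter ha; simpa using this
            have hpra : pvPr a = r.1 := by simp [pvPr, hap]
            have h2 := hitmin a haP (by rw [hpra]; exact hrok)
            omega
        have hr2 : r.2 = it := by
          have h3 : f.get? r.1 = some r.2 :=
            PySem.Dict.get?_of_mem_items f (by cases r; exact hrmem) hnd
          rw [hr1p, hheadp] at h3
          exact (Option.some.injEq _ _ ▸ h3).symm
        have hlists : rest2.filter (fun y => !decide (pvPrice y = pvPrice it))
            = P.filter (fun y => pvOk (some p) (pvPr y)) := by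
          have hhead_f : (it :: rest2).filter (fun y => !decide (pvPrice y = pvPrice it))
              = rest2.filter (fun y => !decide (pvPrice y = pvPrice it)) := by
            simp
          rw [← hhead_f, ← hQ, List.filter_filter]
          apply List.filter_congr
          intro z hz
          obtain ⟨pz, hpz⟩ := Option.isSome_iff_exists.mp (hS z hz)
          have hprz : pvPr z = pz := by simp [pvPr, hpz]
          show (!decide (pvPrice z = pvPrice it) && pvOk lo (pvPr z)) = pvOk (some p) (pvPr z)
          by_cases hlt : p < pz
          · have hok_z : pvOk lo (pvPr z) = true := by
              cases lo with
              | none => rfl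
              | some l =>
                have hl : l < p := by
                  have := hOkp
                  simp only [pvOk, decide_eq_true_eq] at this
                  exact this
                simp [pvOk, hprz]
                omega
            have hne : pvPrice z ≠ pvPrice it := by
              rw [hpz, hp]
              intro h
              have : pz = p := by injection h
              omega
            rw [hprz] at hok_z
            simp only [pvOk] at hok_z
            simp [hne, pvOk, hprz, hlt, hok_z]
          · have hrhs : pvOk (some p) (pvPr z) = false := by
              simp [pvOk, hprz]
              omega
            rw [hrhs]
            by_cases hokz : pvOk lo (pvPr z) = true
            · have hge := hitmin z hz hokz
              have hpzp : pz = p := by rw [hprz] at hge; omega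
              have : pvPrice z = pvPrice it := by rw [hpz, hp, hpzp]
              simp [hokz, this]
            · simp only [Bool.not_eq_true] at hokz
              simp [hokz]
        simp only [pvBRounds, hb]
        rw [hr2, hr1p, ih (some p) f P hP hS hnd hget]
        simp only [pvCanon]
        rw [hlists]

-- Bool test used by the stability rewrites: pvKey y = (true, 0) iff the price is None
theorem pv_key_none (y : List (String × Option Int)) :
    decide (pvKey y = toLex (true, (0 : Int))) = (pvPrice y).isNone := by
  cases hy : pvPrice y <;> simp [pvKey, hy]

theorem pv_key_some (y : List (String × Option Int)) (p : Int) :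
    decide (pvKey y = toLex (false, p)) = decide (pvPrice y = some p) := by
  cases hy : pvPrice y <;> simp [pvKey, hy]

-- per-section agreement
theorem pv_section (items : List (List (String × Option Int))) : pvATake3 items = pvBPick3 items := by
  have hSpair := PySem.List.sorted_pairwise items pvKey
  set S := PySem.List.sorted items pvKey false with hSdef
  set P := S.filter (fun it => !(pvPrice it).isNone) with hPdef
  set N := S.filter (fun it => (pvPrice it).isNone) with hNdef
  have hmono : ∀ a ∈ S, ∀ b ∈ S, pvKey a ≤ pvKey b →
      (pvPrice a).isNone = true → (pvPrice b).isNone = true := by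
    intro a _ b _ hab ha
    rcases Prod.Lex.le_iff.mp hab with h | ⟨h1, _⟩
    · have : (pvPrice a).isNone < (pvPrice b).isNone := h
      rw [ha] at this
      cases hb : (pvPrice b).isNone
      · rw [hb] at this; exact absurd this (by decide)
      · rfl
    · have : (pvPrice b).isNone = (pvPrice a).isNone := h1.symm
      rw [this, ha]
  have hdecomp : S = P ++ N :=
    pv_filter_decomp (fun it => (pvPrice it).isNone) (fun a b => pvKey a ≤ pvKey b) S hSpair hmono
  have hN : N = items.filter (fun it => (pvPrice it).isNone) := by
    have h1 : N = S.filter (fun y => decide (pvKey y = toLex (true, (0 : Int)))) := by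
      rw [hNdef]
      exact (List.filter_congr (fun y _ => pv_key_none y)).symm
    rw [h1, hSdef, pv_sorted_filter pvKey items (toLex (true, (0 : Int)))]
    exact List.filter_congr (fun y _ => pv_key_none y)
  have hPfilters : ∀ p : Int, P.filter (fun y => decide (pvPrice y = some p))
      = items.filter (fun y => decide (pvPrice y = some p)) := by
    intro p
    have h1 : P.filter (fun y => decide (pvPrice y = some p))
        = S.filter (fun y => decide (pvPrice y = some p)) := by
      rw [hPdef, List.filter_filter]
      apply List.filter_congr
      intro z _
      cases hz : pvPrice z <;> simp
    have h2 : S.filter (fun y => decide (pvPrice y = some p))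
        = S.filter (fun y => decide (pvKey y = toLex (false, p))) :=
      (List.filter_congr (fun y _ => pv_key_some y p)).symm
    rw [h1, h2, hSdef, pv_sorted_filter pvKey items (toLex (false, p))]
    exact List.filter_congr (fun y _ => pv_key_some y p)
  have hPsome : ∀ it ∈ P, (pvPrice it).isSome := by
    intro it hit
    have h2 : (pvPrice it).isNone = false := by
      simpa using List.of_mem_filter (p := fun it => !(pvPrice it).isNone) hit
    cases h : pvPrice it
    · rw [h] at h2; simp at h2
    · rfl
  have hPpair : P.Pairwise (fun a b => pvPr a ≤ pvPr b) := by
    have h1 : P.Pairwise (fun a b => pvKey a ≤ pvKey b) := hSpair.sublist List.filter_sublist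
    refine h1.imp_of_mem ?_
    intro a b ha hb hab
    have ha' := hPsome a ha
    have hb' := hPsome b hb
    obtain ⟨pa, hpa⟩ := Option.isSome_iff_exists.mp ha'
    obtain ⟨pb, hpb⟩ := Option.isSome_iff_exists.mp hb'
    rcases Prod.Lex.le_iff.mp hab with h | ⟨_, h2⟩
    · exfalso
      have hlt : (pvPrice a).isNone < (pvPrice b).isNone := h
      rw [hpa, hpb] at hlt
      simp at hlt
    · have h3 : (pvPrice a).getD 0 ≤ (pvPrice b).getD 0 := h2
      simpa [pvPr] using h3
  have hNnone : ∀ it ∈ N, pvPrice it = none := by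
    intro it hit
    have := List.of_mem_filter (p := fun it => (pvPrice it).isNone) hit
    exact Option.isNone_iff_eq_none.mp this
  -- A side
  have hA : pvATake3 items
      = pvCanon P 3 ++ N.take (3 - (pvCanon P 3).length) := by
    unfold pvATake3
    rw [pv_sort_bridge, ← hSdef, hdecomp]
    rw [pvATake_canon P N PySem.Set.empty [] hPpair hPsome (by intro it _; rfl) hNnone]
    simp
  -- B side
  have hget : ∀ p : Int, PySem.Dict.get? (pvBScan items).1 p
      = (P.filter (fun y => decide (pvPrice y = some p))).head? := by
    intro p
    rw [pvBScan_get items p, hPfilters p]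
  have hrounds : pvBRounds 3 none (pvBScan items).1 = pvCanon P 3 := by
    rw [pvBRounds_canon 3 none (pvBScan items).1 P hPpair hPsome (pvBScan_nodup items) hget]
    congr 1
    have : ∀ y, pvOk none (pvPr y) = true := fun _ => rfl
    simp [List.filter_true, this]
  rw [hA]
  unfold pvBPick3
  simp only [hrounds]
  rw [pvBScan_nones items, ← hN]

theorem pvANum_spec (its : List (List (String × Option Int))) : ∀ st : List (Int × (List (String × Option Int))) × Int,
    pvANum st its = (st.1 ++ PySem.List.enumerate its st.2, st.2 + its.length) := by
  induction its with
  | nil => intro st; simp [pvANum, PySem.List.enumerate]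
  | cons x t ih =>
    intro st
    show pvANum (st.1 ++ [(st.2, x)], st.2 + 1) t = _
    rw [ih (st.1 ++ [(st.2, x)], st.2 + 1)]
    rw [PySem.List.enumerate_cons]
    simp only [List.append_assoc, List.singleton_append, List.length_cons]
    congr 1
    push_cast
    omega

theorem pv_enumerate_append (xs ys : List (List (String × Option Int))) : ∀ s : Int,
    PySem.List.enumerate (xs ++ ys) s
      = PySem.List.enumerate xs s ++ PySem.List.enumerate ys (s + xs.length) := by
  induction xs with
  | nil => intro s; simp [PySem.List.enumerate]
  | cons x t ih =>
    intro s
    rw [List.cons_append, PySem.List.enumerate_cons, PySem.List.enumerate_cons, ih (s + 1)]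
    simp only [List.cons_append, List.length_cons]
    have harg : s + 1 + (t.length : Int) = s + ((t.length + 1 : Nat) : Int) := by push_cast; ring
    rw [harg]

-- ===== VERDICT (by name: the statement is the Claim_ definition above) =====
theorem flat_shown_items_py_spec : Claim_equal_flat_shown_items_py := by
  intro r o a _
  show _ = _
  unfold flat_shown_items_py flat_shown_items_py_alt
  rw [pvANum_spec, pvANum_spec, pvANum_spec]
  rw [pv_section r, pv_section o, pv_section a]
  simp only [List.nil_append]
  rw [pv_enumerate_append, pv_enumerate_append]
  simp [List.append_assoc, List.length_append]
  ring_nf
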